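-- pv_equiv track=rewrite | github.com/justkalpane/Shadow-Creator-OS-Phase_01 | scripts/generate_build_values_snapshot.py | _parse_route_registry
-- ===== SOURCE A (Python) =====
-- def _parse_route_registry(text: str) -> list[dict[str, str]]:
--     routes: list[dict[str, str]] = []
--     current: dict[str, str] | None = None
--     for raw_line in text.splitlines():
--         stripped = raw_line.strip()
--         if stripped.startswith("- route_id:") or stripped.startswith("route_id:"):
--             if current and current.get("route_id"):
--                 routes.append(current)
--             current = {"route_id": stripped.split(":", 1)[1].strip()}
--         elif stripped.startswith("entry_workflow:") and current is not None:
--             current["entry_workflow"] = stripped.split(":", 1)[1].strip()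
--     if current and current.get("route_id"):
--         routes.append(current)
--     return routes
-- ===== SOURCE B (Python) =====
-- def _parse_route_registry(text: str) -> list[dict[str, str]]:
--     # Segment-based rewrite: strip all lines once, skip the prologue, then for
--     # each header line scan its segment (up to the next header) for the last
--     # entry_workflow value.  Same results, different decomposition.
--     lines = [ln.strip() for ln in text.splitlines()]
--
--     def is_header(s: str) -> bool:
--         return s.startswith("- route_id:") or s.startswith("route_id:")
--
--     routes: list[dict[str, str]] = []
--     n = len(lines)
--     i = 0
--     while i < n and not is_header(lines[i]):
--         i += 1
--     while i < n:
--         rid = lines[i].split(":", 1)[1].strip()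
--         wf = None
--         j = i + 1
--         while j < n and not is_header(lines[j]):
--             if lines[j].startswith("entry_workflow:"):
--                 wf = lines[j].split(":", 1)[1].strip()
--             j += 1
--         if rid:
--             d = {"route_id": rid}
--             if wf is not None:
--                 d["entry_workflow"] = wf
--             routes.append(d)
--         i = j
--     return routes
-- ===== Notes on version B (the rewrite author's own statement) =====
-- stated objective: simpler
-- what changed: Replaces the streaming state machine (optional current-dict carried through one fold with a final flush) by a two-level segment scan: cut the stripped lines at header lines, then build each route dict from its own segment.
import Mathlib
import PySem

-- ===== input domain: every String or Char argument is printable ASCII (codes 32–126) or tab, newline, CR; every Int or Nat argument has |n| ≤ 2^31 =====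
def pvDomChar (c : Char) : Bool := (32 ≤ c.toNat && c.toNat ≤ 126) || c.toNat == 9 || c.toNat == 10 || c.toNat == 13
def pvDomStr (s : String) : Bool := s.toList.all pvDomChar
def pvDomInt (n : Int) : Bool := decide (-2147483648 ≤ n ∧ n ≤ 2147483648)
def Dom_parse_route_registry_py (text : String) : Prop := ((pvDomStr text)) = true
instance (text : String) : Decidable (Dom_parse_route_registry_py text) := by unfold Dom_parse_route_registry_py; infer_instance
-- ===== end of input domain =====

-- B replaces A's streaming state machine (an optional "current" dict threaded through one pass)
-- by a two-level segment scan (cut the stripped lines at header lines, build each route dict from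
-- its own segment); same return value, simpler decomposition.

-- ===== PORT A =====
-- shared low-level helpers (both Pythons contain the identical stripped-line tests and 'split(":", 1)[1].strip()')
def pvIsHeader (s : String) : Bool :=
  PySem.Str.startswith s "- route_id:" || PySem.Str.startswith s "route_id:"

-- s.split(":", 1)[1].strip(); the [1] index exists whenever s contains ':' (guaranteed by the
-- startswith guards at every call site), so the total getD defaults are never reached
def pvColonVal (s : String) : String :=
  PySem.Str.strip (((PySem.Str.splitMax? s ":" 1).getD []).getD 1 "")

-- 'if current and current.get("route_id"): routes.append(current)' — a missing key and an empty value are both falsy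
def pvPush (routes : List (PySem.Dict String String)) (cur : Option (PySem.Dict String String)) :
    List (PySem.Dict String String) :=
  match cur with
  | none => routes
  | some d => if (!d.items.isEmpty) && (d.getD "route_id" "" != "") then routes ++ [d] else routes

-- the 'for raw_line in text.splitlines():' loop; the trailing flush is the base case
def pvALoop : List String → List (PySem.Dict String String) → Option (PySem.Dict String String) →
    List (PySem.Dict String String)
  | [], routes, cur => pvPush routes cur
  | raw :: rest, routes, cur =>
    let s := PySem.Str.strip raw
    if pvIsHeader s then
      pvALoop rest (pvPush routes cur) (some (PySem.Dict.ofList [("route_id", pvColonVal s)]))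
    else if PySem.Str.startswith s "entry_workflow:" && cur.isSome then
      pvALoop rest routes (cur.map (fun d => d.insert "entry_workflow" (pvColonVal s)))
    else
      pvALoop rest routes cur

def parse_route_registry_py (text : String) : List (List (String × String)) :=
  (pvALoop (PySem.Str.splitlines text) [] none).map (·.items)

-- ===== PORT B =====
-- d = {"route_id": rid}; if wf is not None: d["entry_workflow"] = wf
def pvMkRoute (rid : String) (wf : Option String) : List (String × String) :=
  ("route_id", rid) :: (match wf with | some w => [("entry_workflow", w)] | none => [])

-- the inner 'while' scan of a segment body: last entry_workflow value, starting from None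
def pvEntryVal (body : List String) : Option String :=
  body.foldl (fun w s => if PySem.Str.startswith s "entry_workflow:" then some (pvColonVal s) else w) none

-- outer loop: skip to the next header, then consume its segment (takeWhile/dropWhile = the index j scan)
def pvBGo : List String → List (List (String × String))
  | [] => []
  | s :: rest =>
    if pvIsHeader s then
      (if pvColonVal s != "" then
        [pvMkRoute (pvColonVal s) (pvEntryVal (rest.takeWhile (fun t => !pvIsHeader t)))]
       else [])
        ++ pvBGo (rest.dropWhile (fun t => !pvIsHeader t))
    else pvBGo rest
termination_by l => l.length
decreasing_by
  · exact Nat.lt_succ_of_le (List.length_dropWhile_le _ _)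
  · simp

def parse_route_registry_py_alt (text : String) : List (List (String × String)) :=
  pvBGo ((PySem.Str.splitlines text).map PySem.Str.strip)

-- ===== PRECONDITION & SPEC =====
def Spec_parse_route_registry_py (text : String) (out : List (List (String × String))) : Prop := out = parse_route_registry_py_alt text
instance (text : String) (out : List (List (String × String))) : Decidable (Spec_parse_route_registry_py text out) := by unfold Spec_parse_route_registry_py; infer_instance

-- ===== CLAIM (what is proved, stated in full; the proofs are below) =====
def Claim_equal_parse_route_registry_py : Prop := ∀ (text : String), Dom_parse_route_registry_py text → Spec_parse_route_registry_py text (parse_route_registry_py text)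

-- ===== LEMMAS AND PROOFS =====

-- proof-side: the shape A's current dict always has — route_id first, then an optional entry_workflow
def pvCurD (rid : String) (wf : Option String) : PySem.Dict String String :=
  match wf with
  | none => PySem.Dict.ofList [("route_id", rid)]
  | some w => (PySem.Dict.ofList [("route_id", rid)]).insert "entry_workflow" w

-- proof-side: the segment-body fold with an arbitrary seed (pvEntryVal is the seed-none instance)
def pvUpd (wf : Option String) (body : List String) : Option String :=
  body.foldl (fun w s => if PySem.Str.startswith s "entry_workflow:" then some (pvColonVal s) else w) wf

lemma pvCurD_items (rid : String) (wf : Option String) :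
    (pvCurD rid wf).items = pvMkRoute rid wf := by
  cases wf <;> rfl

lemma pvCurD_getD (rid : String) (wf : Option String) :
    (pvCurD rid wf).getD "route_id" "" = rid := by
  cases wf <;> rfl

lemma pvCurD_insert (rid : String) (wf : Option String) (v : String) :
    (pvCurD rid wf).insert "entry_workflow" v = pvCurD rid (some v) := by
  cases wf <;> rfl

lemma pvPush_empty (rid : String) (wf : Option String) :
    pvPush [] (some (pvCurD rid wf)) = if rid != "" then [pvCurD rid wf] else [] := by
  simp only [pvPush, pvCurD_items, pvCurD_getD, pvMkRoute, List.isEmpty_cons, Bool.not_false,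
    Bool.true_and, List.nil_append]

lemma pvPush_acc (routes : List (PySem.Dict String String))
    (cur : Option (PySem.Dict String String)) :
    pvPush routes cur = routes ++ pvPush [] cur := by
  cases cur with
  | none => simp [pvPush]
  | some d => simp only [pvPush]; split_ifs <;> simp

lemma pvALoop_acc (ls : List String) (routes : List (PySem.Dict String String))
    (cur : Option (PySem.Dict String String)) :
    pvALoop ls routes cur = routes ++ pvALoop ls [] cur := by
  induction ls generalizing routes cur with
  | nil => exact pvPush_acc routes cur
  | cons raw rest ih =>
    simp only [pvALoop]
    split_ifs with h1 h2
    · rw [ih, ih (pvPush [] cur), pvPush_acc routes cur, List.append_assoc]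
    · rw [ih]
    · exact ih routes cur

lemma pvALoop_seg (ls : List String) (rid : String) (wf : Option String) :
    (pvALoop ls [] (some (pvCurD rid wf))).map (·.items) =
      (if rid != "" then
        [pvMkRoute rid (pvUpd wf ((ls.map PySem.Str.strip).takeWhile (fun t => !pvIsHeader t)))]
       else [])
        ++ pvBGo ((ls.map PySem.Str.strip).dropWhile (fun t => !pvIsHeader t)) := by
  induction ls generalizing rid wf with
  | nil =>
    simp only [pvALoop, List.map_nil, List.takeWhile_nil, List.dropWhile_nil]
    rw [pvPush_empty]
    split_ifs <;> simp [pvCurD_items, pvUpd, pvBGo]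
  | cons raw rest ih =>
    simp only [pvALoop, List.map_cons]
    by_cases h1 : pvIsHeader (PySem.Str.strip raw)
    · rw [if_pos h1, pvALoop_acc,
        show PySem.Dict.ofList [("route_id", pvColonVal (PySem.Str.strip raw))]
          = pvCurD (pvColonVal (PySem.Str.strip raw)) none from rfl]
      rw [List.map_append, ih (pvColonVal (PySem.Str.strip raw)) none, pvPush_empty]
      rw [List.takeWhile_cons_of_neg (by simp [h1]), List.dropWhile_cons_of_neg (by simp [h1])]
      rw [pvBGo]
      rw [if_pos h1]
      split_ifs <;> simp [pvCurD_items, pvUpd, pvEntryVal]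
    · rw [if_neg h1]
      rw [List.takeWhile_cons_of_pos (by simp [h1]), List.dropWhile_cons_of_pos (by simp [h1])]
      by_cases h2 : PySem.Str.startswith (PySem.Str.strip raw) "entry_workflow:" = true
      · simp only [h2, Option.isSome_some, Bool.and_true, if_true, Option.map_some,
          pvCurD_insert]
        rw [ih rid (some (pvColonVal (PySem.Str.strip raw)))]
        simp only [pvUpd, List.foldl_cons, h2, if_true]
      · simp only [h2, Bool.false_and, Option.isSome_some]
        rw [if_neg (by exact Bool.false_ne_true), ih rid wf]
        simp only [pvUpd, List.foldl_cons, if_neg h2]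

lemma pvALoop_none (ls : List String) :
    (pvALoop ls [] none).map (·.items) = pvBGo (ls.map PySem.Str.strip) := by
  induction ls with
  | nil => simp [pvALoop, pvPush, pvBGo]
  | cons raw rest ih =>
    simp only [pvALoop, List.map_cons]
    by_cases h1 : pvIsHeader (PySem.Str.strip raw)
    · rw [if_pos h1,
        show PySem.Dict.ofList [("route_id", pvColonVal (PySem.Str.strip raw))]
          = pvCurD (pvColonVal (PySem.Str.strip raw)) none from rfl]
      show (pvALoop rest (pvPush [] none) _).map _ = _
      rw [show pvPush [] none = [] from rfl, pvALoop_seg, pvBGo, if_pos h1]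
      rfl
    · rw [if_neg h1]
      simp only [Option.isSome_none, Bool.and_false, if_false, Bool.false_eq_true]
      rw [pvBGo, if_neg h1]
      exact ih

-- ===== VERDICT (by name: the statement is the Claim_ definition above) =====
theorem parse_route_registry_py_spec : Claim_equal_parse_route_registry_py := by
  intro text _
  show _ = _
  simp only [parse_route_registry_py, parse_route_registry_py_alt]
  exact pvALoop_none _
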